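-- pv_equiv track=rewrite | github.com/haythamsoufi/ngodatabank | Backoffice/app/utils/profile_summary_payload.py | role_badge_key_from_rbac_codes
-- ===== SOURCE A (Python) =====
-- def role_badge_key_from_rbac_codes(codes: list[str | None]) -> str:
--     """
--     Coarse role bucket for hover UI (matches user-hover-profile.js themes).
--
--     Order: system_manager > admin (any admin_* or substring admin) >
--     focal_point / assignment > default user.
--     """
--     normalized: list[str] = []
--     for raw in codes:
--         t = str(raw or "").strip().lower().replace(" ", "_").replace("-", "_").replace("/", "_")
--         if t:
--             normalized.append(t)
--     for token in normalized:
--         if "system_manager" in token: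
--             return "system_manager"
--     for token in normalized:
--         if "admin" in token:
--             return "admin"
--     for token in normalized:
--         if "focal_point" in token or "assignment_" in token:
--             return "focal_point"
--     return "user"
-- ===== SOURCE B (Python) =====
-- def role_badge_key_from_rbac_codes(codes):
--     best = 3
--     for raw in codes:
--         t = str(raw or "").strip().lower().replace(" ", "_").replace("-", "_").replace("/", "_")
--         if not t:
--             continue
--         if "system_manager" in t:
--             r = 0
--         elif "admin" in t:
--             r = 1
--         elif "focal_point" in t or "assignment_" in t:
--             r = 2
--         else:
--             r = 3
--         best = min(best, r)
--     return ("system_manager", "admin", "focal_point", "user")[best]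
-- ===== Notes on version B (the rewrite author's own statement) =====
-- stated objective: alternative
-- what changed: Replaces A's four-pass pipeline (build a normalized list, then three separate scans in priority order) with one pass that normalizes each code inline, assigns it a priority rank, keeps the minimum rank seen, and maps the final rank to the badge key.
import Mathlib
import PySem

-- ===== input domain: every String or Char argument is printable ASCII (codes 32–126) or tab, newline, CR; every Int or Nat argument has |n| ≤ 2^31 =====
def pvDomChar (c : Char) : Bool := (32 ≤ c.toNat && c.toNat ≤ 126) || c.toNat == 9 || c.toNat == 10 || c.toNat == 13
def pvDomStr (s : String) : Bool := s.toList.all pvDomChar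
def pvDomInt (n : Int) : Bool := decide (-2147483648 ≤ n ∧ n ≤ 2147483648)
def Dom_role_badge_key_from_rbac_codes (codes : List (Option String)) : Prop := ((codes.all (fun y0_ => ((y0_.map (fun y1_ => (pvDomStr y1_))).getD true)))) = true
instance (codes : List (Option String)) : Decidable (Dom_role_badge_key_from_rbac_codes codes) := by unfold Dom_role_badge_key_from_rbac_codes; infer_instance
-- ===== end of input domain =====

-- B is a single pass keeping the minimum priority rank, instead of A's normalized-list build followed by three priority scans (alternative decomposition, same cost).

-- ===== PORT A =====
-- the three substring tests of A (B reuses them for its rank table)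
def pvP1 (t : String) : Bool := PySem.Str.isIn "system_manager" t
def pvP2 (t : String) : Bool := PySem.Str.isIn "admin" t
def pvP3 (t : String) : Bool := PySem.Str.isIn "focal_point" t || PySem.Str.isIn "assignment_" t

-- t = str(raw or "").strip().lower().replace(" ", "_").replace("-", "_").replace("/", "_")
def pvNorm (raw : Option String) : String :=
  PySem.Str.replace (PySem.Str.replace (PySem.Str.replace
    (PySem.Str.lower (PySem.Str.strip (raw.getD ""))) " " "_") "-" "_") "/" "_"

-- for token in normalized: if "system_manager" in token: return "system_manager"
def pvLoop1 : List String → Option String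
  | [] => none
  | t :: ts => if pvP1 t then some "system_manager" else pvLoop1 ts

-- for token in normalized: if "admin" in token: return "admin"
def pvLoop2 : List String → Option String
  | [] => none
  | t :: ts => if pvP2 t then some "admin" else pvLoop2 ts

-- for token in normalized: if "focal_point" in token or "assignment_" in token: return "focal_point"
def pvLoop3 : List String → Option String
  | [] => none
  | t :: ts => if pvP3 t then some "focal_point" else pvLoop3 ts

def role_badge_key_from_rbac_codes (codes : List (Option String)) : String :=
  let normalized := codes.foldl (fun acc raw =>
    let t := pvNorm raw
    if t ≠ "" then acc ++ [t] else acc) []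
  match pvLoop1 normalized with
  | some r => r
  | none =>
    match pvLoop2 normalized with
    | some r => r
    | none =>
      match pvLoop3 normalized with
      | some r => r
      | none => "user"

-- ===== PORT B =====
-- priority rank of one normalized token
def pvRank (t : String) : Nat :=
  if pvP1 t then 0
  else if pvP2 t then 1
  else if pvP3 t then 2
  else 3

def role_badge_key_from_rbac_codes_alt (codes : List (Option String)) : String :=
  let best := codes.foldl (fun best raw =>
    let t := pvNorm raw
    if t = "" then best else min best (pvRank t)) 3
  -- ("system_manager", "admin", "focal_point", "user")[best]
  match best with
  | 0 => "system_manager"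
  | 1 => "admin"
  | 2 => "focal_point"
  | _ => "user"

-- ===== PRECONDITION & SPEC =====
def Spec_role_badge_key_from_rbac_codes (codes : List (Option String)) (out : String) : Prop := out = role_badge_key_from_rbac_codes_alt codes
instance (codes : List (Option String)) (out : String) : Decidable (Spec_role_badge_key_from_rbac_codes codes out) := by unfold Spec_role_badge_key_from_rbac_codes; infer_instance

-- ===== CLAIM (what is proved, stated in full; the proofs are below) =====
def Claim_equal_role_badge_key_from_rbac_codes : Prop := ∀ (codes : List (Option String)), Dom_role_badge_key_from_rbac_codes codes → Spec_role_badge_key_from_rbac_codes codes (role_badge_key_from_rbac_codes codes)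

-- ===== LEMMAS AND PROOFS =====

-- the normalized token list both programs traverse
def pvNs (codes : List (Option String)) : List String := (codes.map pvNorm).filter (· ≠ "")

-- minimum rank over a token list (rank 3 = no match)
def pvM (ns : List String) : Nat := ns.foldl (fun b t => min b (pvRank t)) 3

theorem pvRank_eq (t : String) :
    pvRank t = if pvP1 t then 0 else if pvP2 t then 1 else if pvP3 t then 2 else 3 := rfl

theorem pvRank_le (t : String) : pvRank t ≤ 3 := by
  rw [pvRank_eq]; split_ifs <;> omega

theorem pvFoldl_min (ns : List String) (b : Nat) (hb : b ≤ 3) :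
    ns.foldl (fun b t => min b (pvRank t)) b = min b (pvM ns) := by
  induction ns generalizing b with
  | nil => simp only [List.foldl_nil, pvM]; omega
  | cons t ts ih =>
    have h3 := pvRank_le t
    simp only [List.foldl_cons, pvM] at *
    rw [ih (min b (pvRank t)) (by omega), ih (min 3 (pvRank t)) (by omega)]
    omega

theorem pvM_cons (t : String) (ts : List String) :
    pvM (t :: ts) = min (pvRank t) (pvM ts) := by
  have h3 := pvRank_le t
  have h := pvFoldl_min ts (min 3 (pvRank t)) (by omega)
  simp only [pvM, List.foldl_cons] at h ⊢
  rw [h]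
  omega

theorem pvM0 (ns : List String) (h : ns.any pvP1 = true) : pvM ns = 0 := by
  induction ns with
  | nil => simp at h
  | cons t ts ih =>
    rw [pvM_cons]
    simp only [List.any_cons, Bool.or_eq_true] at h
    rcases h with h' | h'
    · have : pvRank t = 0 := by rw [pvRank_eq, h']; rfl
      rw [this]; omega
    · rw [ih h']; omega

theorem pvM_ge1 (ns : List String) (h : ns.any pvP1 = false) : 1 ≤ pvM ns := by
  induction ns with
  | nil => simp [pvM]
  | cons t ts ih =>
    rw [pvM_cons]
    simp only [List.any_cons, Bool.or_eq_false_iff] at h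
    rcases h with ⟨h1, hts⟩
    have hr : 1 ≤ pvRank t := by rw [pvRank_eq, h1]; simp only [Bool.false_eq_true, if_false]; split_ifs <;> omega
    have := ih hts
    omega

theorem pvM1 (ns : List String) (h1 : ns.any pvP1 = false) (h2 : ns.any pvP2 = true) :
    pvM ns = 1 := by
  have hge := pvM_ge1 ns h1
  have hle : pvM ns ≤ 1 := by
    induction ns with
    | nil => simp at h2
    | cons t ts ih =>
      rw [pvM_cons]
      simp only [List.any_cons, Bool.or_eq_false_iff] at h1
      rcases h1 with ⟨ha, hts⟩
      simp only [List.any_cons, Bool.or_eq_true] at h2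
      rcases h2 with h' | h'
      · have : pvRank t = 1 := by rw [pvRank_eq, ha, h']; rfl
        rw [this]; omega
      · have := ih hts h' (pvM_ge1 ts hts)
        omega
  omega

theorem pvM_ge2 (ns : List String) (h1 : ns.any pvP1 = false) (h2 : ns.any pvP2 = false) :
    2 ≤ pvM ns := by
  induction ns with
  | nil => simp [pvM]
  | cons t ts ih =>
    rw [pvM_cons]
    simp only [List.any_cons, Bool.or_eq_false_iff] at h1
    rcases h1 with ⟨ha, hts⟩
    simp only [List.any_cons, Bool.or_eq_false_iff] at h2
    rcases h2 with ⟨hb, hts2⟩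
    have hr : 2 ≤ pvRank t := by rw [pvRank_eq, ha, hb]; simp only [Bool.false_eq_true, if_false]; split_ifs <;> omega
    have := ih hts hts2
    omega

theorem pvM2 (ns : List String) (h1 : ns.any pvP1 = false) (h2 : ns.any pvP2 = false)
    (h3 : ns.any pvP3 = true) : pvM ns = 2 := by
  have hge := pvM_ge2 ns h1 h2
  have hle : pvM ns ≤ 2 := by
    induction ns with
    | nil => simp at h3
    | cons t ts ih =>
      rw [pvM_cons]
      simp only [List.any_cons, Bool.or_eq_false_iff] at h1
      rcases h1 with ⟨ha, hts⟩
      simp only [List.any_cons, Bool.or_eq_false_iff] at h2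
      rcases h2 with ⟨hb, hts2⟩
      simp only [List.any_cons, Bool.or_eq_true] at h3
      rcases h3 with h' | h'
      · have : pvRank t = 2 := by rw [pvRank_eq, ha, hb, h']; rfl
        rw [this]; omega
      · have := ih hts hts2 h' (pvM_ge2 ts hts hts2)
        omega
  omega

theorem pvM3 (ns : List String) (h1 : ns.any pvP1 = false) (h2 : ns.any pvP2 = false)
    (h3 : ns.any pvP3 = false) : pvM ns = 3 := by
  induction ns with
  | nil => simp [pvM]
  | cons t ts ih =>
    rw [pvM_cons]
    simp only [List.any_cons, Bool.or_eq_false_iff] at h1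
    rcases h1 with ⟨ha, hts⟩
    simp only [List.any_cons, Bool.or_eq_false_iff] at h2
    rcases h2 with ⟨hb, hts2⟩
    simp only [List.any_cons, Bool.or_eq_false_iff] at h3
    rcases h3 with ⟨hc, hts3⟩
    have : pvRank t = 3 := by rw [pvRank_eq, ha, hb, hc]; rfl
    rw [this, ih hts hts2 hts3]
    omega

theorem pvNormA_eq (codes : List (Option String)) (acc : List String) :
    codes.foldl (fun acc raw => let t := pvNorm raw; if t ≠ "" then acc ++ [t] else acc) acc
      = acc ++ pvNs codes := by
  induction codes generalizing acc with
  | nil => simp [pvNs]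
  | cons c cs ih =>
    rw [List.foldl_cons, ih]
    by_cases h : pvNorm c = "" <;> simp [pvNs, h]

theorem pvAltB_eq (codes : List (Option String)) (b : Nat) :
    codes.foldl (fun best raw => let t := pvNorm raw; if t = "" then best else min best (pvRank t)) b
      = (pvNs codes).foldl (fun b t => min b (pvRank t)) b := by
  induction codes generalizing b with
  | nil => simp [pvNs]
  | cons c cs ih =>
    rw [List.foldl_cons, ih]
    by_cases h : pvNorm c = "" <;> simp [pvNs, h]

theorem pvLoop1_eq (ns : List String) :
    pvLoop1 ns = if ns.any pvP1 then some "system_manager" else none := by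
  induction ns with
  | nil => rfl
  | cons t ts ih =>
    simp only [pvLoop1]
    rw [List.any_cons, ih]
    cases h : pvP1 t <;> simp_all

theorem pvLoop2_eq (ns : List String) :
    pvLoop2 ns = if ns.any pvP2 then some "admin" else none := by
  induction ns with
  | nil => rfl
  | cons t ts ih =>
    simp only [pvLoop2]
    rw [List.any_cons, ih]
    cases h : pvP2 t <;> simp_all

theorem pvLoop3_eq (ns : List String) :
    pvLoop3 ns = if ns.any pvP3 then some "focal_point" else none := by
  induction ns with
  | nil => rfl
  | cons t ts ih =>
    simp only [pvLoop3]
    rw [List.any_cons, ih]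
    cases h : pvP3 t <;> simp_all

-- the core fact: A's three option-returning scans pick exactly the badge of the minimum rank
theorem pvKey (ns : List String) :
    (match (if ns.any pvP1 then some "system_manager" else none) with
     | some r => r
     | none =>
       match (if ns.any pvP2 then some "admin" else none) with
       | some r => r
       | none =>
         match (if ns.any pvP3 then some "focal_point" else none) with
         | some r => r
         | none => "user")
      = (match pvM ns with
         | 0 => "system_manager" | 1 => "admin" | 2 => "focal_point" | _ => "user") := by
  cases h1 : ns.any pvP1
  · cases h2 : ns.any pvP2
    · cases h3 : ns.any pvP3
      · rw [pvM3 ns h1 h2 h3]; simp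
      · rw [pvM2 ns h1 h2 h3]; simp
    · rw [pvM1 ns h1 h2]; simp
  · rw [pvM0 ns h1]; simp

-- ===== VERDICT (by name: the statement is the Claim_ definition above) =====
theorem role_badge_key_from_rbac_codes_spec : Claim_equal_role_badge_key_from_rbac_codes := by
  intro codes _
  unfold Spec_role_badge_key_from_rbac_codes role_badge_key_from_rbac_codes role_badge_key_from_rbac_codes_alt
  simp only [pvNormA_eq codes [], List.nil_append, pvAltB_eq codes 3]
  rw [pvLoop1_eq, pvLoop2_eq, pvLoop3_eq,
      show (pvNs codes).foldl (fun b t => min b (pvRank t)) 3 = pvM (pvNs codes) from rfl]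
  exact pvKey (pvNs codes)
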